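-- pv_equiv track=rewrite | github.com/shk247/LeatCode_Baekjoon | Baekjoon/2022-01/1038.py | check
-- ===== SOURCE A (Python) =====
-- def check(n):
--     pre = r = -1
--     while n != 0:
--         n, r = divmod(n, 10)
--         if pre>=r:
--             return False
--         pre = r
--     return True
-- ===== SOURCE B (Python) =====
-- def check(n):
--     s = str(n)
--     return list(s) == sorted(s, reverse=True) and len(set(s)) == len(s)
-- ===== Notes on version B (the rewrite author's own statement) =====
-- stated objective: simpler
-- what changed: Replaces the incremental divmod loop with a whole-string characterization: the decimal string equals its descending sort and has all-distinct characters.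
import Mathlib
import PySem

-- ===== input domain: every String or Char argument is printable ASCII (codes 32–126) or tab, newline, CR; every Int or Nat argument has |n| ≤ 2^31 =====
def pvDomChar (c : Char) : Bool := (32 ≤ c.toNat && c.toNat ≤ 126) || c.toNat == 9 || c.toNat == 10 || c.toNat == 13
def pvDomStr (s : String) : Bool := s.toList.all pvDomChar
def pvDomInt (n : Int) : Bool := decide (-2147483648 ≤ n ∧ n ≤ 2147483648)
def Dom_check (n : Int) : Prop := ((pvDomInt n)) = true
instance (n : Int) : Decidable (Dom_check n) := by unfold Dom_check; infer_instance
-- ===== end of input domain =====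

-- B replaces A's incremental divmod/compare loop by a whole-string test: str(n) equals its
-- descending sort and all its characters are distinct (objective: simpler).

-- ===== PORT A =====
-- the while-loop of A: fuel only makes the recursion structural; 64 is never exhausted for |n| ≤ 2^31
-- (a positive n has ≤ 10 digits; a negative n returns False within ~13 iterations)
def checkLoop : Nat → Int → Int → Bool
  | 0, _, _ => false
  | fuel+1, n, pre =>
    if n = 0 then true
    else
      let r := PySem.Int.mod n 10          -- n, r = divmod(n, 10)
      if pre ≥ r then false
      else checkLoop fuel (PySem.Int.floordiv n 10) r   -- pre = r; continue

def check (n : Int) : Bool := checkLoop 64 n (-1)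

-- ===== PORT B =====
def check_alt (n : Int) : Bool :=
  let s := PySem.Int.toChars n             -- s = str(n)
  decide (s = PySem.List.sorted s (fun c => c) true)   -- list(s) == sorted(s, reverse=True)
    && decide (PySem.List.len (PySem.Set.ofList s) = PySem.List.len s)  -- len(set(s)) == len(s)

-- ===== PRECONDITION & SPEC =====
def Spec_check (n : Int) (out : Bool) : Prop := out = check_alt n
instance (n : Int) (out : Bool) : Decidable (Spec_check n out) := by unfold Spec_check; infer_instance

-- ===== CLAIM (what is proved, stated in full; the proofs are below) =====
def Claim_equal_check : Prop := ∀ (n : Int), Dom_check n → Spec_check n (check n)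

-- ===== LEMMAS AND PROOFS =====

lemma checkLoop_succ (f : Nat) (n pre : Int) :
    checkLoop (f + 1) n pre =
      if n = 0 then true
      else if pre ≥ PySem.Int.mod n 10 then false
      else checkLoop f (PySem.Int.floordiv n 10) (PySem.Int.mod n 10) := rfl

-- A on a negative n never reaches 0 and eventually compares 9 ≥ 9: always False.
lemma checkLoop_neg : ∀ (f : Nat) (n pre : Int), n < 0 → checkLoop f n pre = false := by
  intro f
  induction f with
  | zero => intro n pre _; rfl
  | succ f ih =>
    intro n pre hn
    have hne : n ≠ 0 := by omega
    have hq : PySem.Int.floordiv n 10 < 0 := by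
      have h1 := PySem.Int.floordiv_mul_add_mod n 10
      have h2 := PySem.Int.mod_nonneg n (b := 10) (by norm_num)
      have h3 := PySem.Int.mod_lt n (b := 10) (by norm_num)
      by_contra h
      omega
    rw [checkLoop_succ, if_neg hne]
    split
    · rfl
    · exact ih _ _ hq

-- A's loop on a nonnegative m: pre followed by the base-10 digits of m (little-endian)
-- must be strictly increasing.
lemma checkLoop_pos : ∀ (f : Nat) (m : Nat) (pre : Int), m < 10 ^ f →
    (checkLoop (f + 1) (m : Int) pre = true ↔
      List.Pairwise (· < ·) (pre :: (Nat.digits 10 m).map (fun d : Nat => (d : Int)))) := by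
  intro f
  induction f with
  | zero =>
    intro m pre hm
    interval_cases m
    simp [checkLoop_succ]
  | succ f ih =>
    intro m pre hm
    by_cases h0 : m = 0
    · subst h0; simp [checkLoop_succ]
    · have hm0 : 0 < m := Nat.pos_of_ne_zero h0
      have hdig : Nat.digits 10 m = m % 10 :: Nat.digits 10 (m / 10) :=
        Nat.digits_def' (by norm_num) hm0
      have hne : (m : Int) ≠ 0 := by exact_mod_cast h0
      have hr : PySem.Int.mod (m : Int) 10 = ((m % 10 : Nat) : Int) := by
        exact_mod_cast PySem.Int.mod_natCast m 10
      have hq : PySem.Int.floordiv (m : Int) 10 = ((m / 10 : Nat) : Int) := by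
        exact_mod_cast PySem.Int.floordiv_natCast m 10
      have hlt : m / 10 < 10 ^ f := by
        have he : (10 : Nat) ^ (f + 1) = 10 ^ f * 10 := by ring
        omega
      rw [checkLoop_succ, if_neg hne, hr, hq, hdig]
      by_cases hge : pre ≥ ((m % 10 : Nat) : Int)
      · rw [if_pos hge]
        simp only [List.map_cons, List.pairwise_cons, Bool.false_eq_true, false_iff]
        rintro ⟨hall, -⟩
        exact absurd (hall _ (List.mem_cons_self)) (by omega)
      · rw [if_neg hge, ih (m / 10) ((m % 10 : Nat) : Int) hlt]
        simp only [List.map_cons, List.pairwise_cons]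
        constructor
        · rintro ⟨hall, htail⟩
          refine ⟨?_, hall, htail⟩
          intro x hx
          rcases List.mem_cons.1 hx with hx | hx
          · subst hx; omega
          · exact lt_trans (by omega) (hall x hx)
        · rintro ⟨-, hall, htail⟩
          exact ⟨hall, htail⟩

-- core's toDigits is the reversed digitChar image of Nat.digits
lemma toDigits_eq_rev : ∀ (m : Nat), 0 < m →
    Nat.toDigits 10 m = ((Nat.digits 10 m).map Nat.digitChar).reverse := by
  intro m
  induction m using Nat.strong_induction_on with
  | _ m ih =>
    intro hm
    by_cases h : m < 10
    · rw [Nat.toDigits_of_lt_base h, Nat.digits_def' (by norm_num) hm,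
        Nat.div_eq_of_lt h, Nat.digits_zero, Nat.mod_eq_of_lt h]
      simp
    · have h10 : 10 ≤ m := by omega
      have hdivpos : 0 < m / 10 := Nat.div_pos h10 (by norm_num)
      rw [Nat.toDigits_of_base_le (by norm_num) h10,
        ih (m / 10) (Nat.div_lt_self hm (by norm_num)) hdivpos,
        Nat.digits_def' (by norm_num) hm]
      simp

-- digitChar is order-preserving on 0..9
lemma digitChar_lt_iff : ∀ a < 10, ∀ b < 10, (Nat.digitChar a < Nat.digitChar b ↔ a < b) := by
  decide

-- set(s) keeps the length exactly when s has no duplicates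
lemma ofList_length_iff_nodup (xs : List Char) :
    (PySem.Set.ofList xs).length = xs.length ↔ xs.Nodup := by
  constructor
  · intro h
    have hsp : List.Subperm (PySem.Set.ofList xs) xs :=
      (PySem.Set.nodup_ofList xs).subperm (fun a ha => (PySem.Set.mem_ofList xs a).1 ha)
    have hperm : (PySem.Set.ofList xs).Perm xs := hsp.perm_of_length_le (le_of_eq h.symm)
    exact hperm.nodup (PySem.Set.nodup_ofList xs)
  · intro h
    rw [PySem.Set.ofList_eq_self_of_nodup xs h]

-- B's whole-string condition is exactly "strictly decreasing characters"
lemma alt_char (cs : List Char) :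
    (cs = PySem.List.sorted cs (fun c => c) true ∧ (PySem.Set.ofList cs).length = cs.length)
      ↔ List.Pairwise (fun a b => b < a) cs := by
  constructor
  · rintro ⟨hs, hn⟩
    have hge : List.Pairwise (fun a b : Char => b ≤ a) cs := by
      conv => rw [hs]
      exact PySem.List.sorted_pairwise_rev cs (fun c => c)
    have hnd : cs.Nodup := (ofList_length_iff_nodup cs).1 hn
    exact (hge.and hnd).imp (fun h => lt_of_le_of_ne h.1 (Ne.symm h.2))
  · intro h
    refine ⟨?_, (ofList_length_iff_nodup cs).2 (h.imp fun hlt => (ne_of_lt hlt).symm)⟩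
    exact (PySem.List.sorted_rev_eq_self_of_pairwise cs (fun c => c)
      (h.imp fun hlt => le_of_lt hlt)).symm

-- unfolding check_alt into the Prop form
lemma check_alt_eq_true_iff (n : Int) :
    check_alt n = true ↔
      (PySem.Int.toChars n = PySem.List.sorted (PySem.Int.toChars n) (fun c => c) true ∧
        (PySem.Set.ofList (PySem.Int.toChars n)).length = (PySem.Int.toChars n).length) := by
  simp [check_alt, PySem.List.len_eq]

-- B on a negative n: the string starts with '-', which is smaller than any digit char
lemma alt_neg (n : Int) (hn : n < 0) : check_alt n = false := by
  rw [Bool.eq_false_iff]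
  intro htrue
  have hpair := (alt_char _).1 ((check_alt_eq_true_iff n).1 htrue)
  have hcs : PySem.Int.toChars n = '-' :: Nat.toDigits 10 n.natAbs := by
    simp [PySem.Int.toChars, hn]
  rw [hcs] at hpair
  obtain ⟨d, ds, hds⟩ : ∃ d ds, Nat.toDigits 10 n.natAbs = d :: ds := by
    rcases hh : Nat.toDigits 10 n.natAbs with _ | ⟨d, ds⟩
    · exact absurd (Nat.length_toDigits_pos (b := 10) (n := n.natAbs)) (by simp [hh])
    · exact ⟨d, ds, rfl⟩
  rw [hds] at hpair
  have hdlt : d < '-' := (List.pairwise_cons.1 hpair).1 d (by simp)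
  have hdig : d.isDigit = true :=
    Nat.isDigit_of_mem_toDigits (b := 10) (n := n.natAbs) (by norm_num) (by norm_num)
      (by rw [hds]; simp)
  have h48 : 48 ≤ d.toNat := by
    simp only [Char.isDigit, Bool.and_eq_true, decide_eq_true_eq] at hdig
    obtain ⟨h1, -⟩ := hdig
    have h3 : ('0'.val).toNat ≤ d.val.toNat := UInt32.le_iff_toNat_le.mp h1
    have h4 : ('0'.val).toNat = 48 := rfl
    rw [Char.toNat]
    omega
  have h45 : d.toNat < 45 := by
    have h3 : d.val.toNat < ('-'.val).toNat := UInt32.lt_iff_toNat_lt.mp hdlt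
    have h4 : ('-'.val).toNat = 45 := rfl
    rw [Char.toNat]
    omega
  omega

-- ===== VERDICT (by name: the statement is the Claim_ definition above) =====
theorem check_spec : Claim_equal_check := by
  intro n hdom
  unfold Spec_check
  rcases lt_trichotomy n 0 with hn | hn | hn
  · rw [alt_neg n hn]
    exact checkLoop_neg 64 n (-1) hn
  · subst hn; decide
  · -- positive case
    have hdom' : n ≤ 2147483648 := by
      simp only [Dom_check, pvDomInt, decide_eq_true_eq] at hdom
      exact hdom.2
    obtain ⟨m, rfl⟩ : ∃ m : Nat, n = (m : Int) :=
      ⟨n.toNat, (Int.toNat_of_nonneg (le_of_lt hn)).symm⟩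
    have hm0 : 0 < m := by exact_mod_cast hn
    have hmb : m < 10 ^ 63 := by
      have h1 : m ≤ 2147483648 := by exact_mod_cast hdom'
      have h2 : (2147483648 : Nat) < 10 ^ 63 := by norm_num
      omega
    have e1 : check (m : Int) = checkLoop (63 + 1) (m : Int) (-1) := rfl
    rw [Bool.eq_iff_iff, e1, checkLoop_pos 63 m (-1) hmb, check_alt_eq_true_iff, alt_char]
    have hcs : PySem.Int.toChars (m : Int) = ((Nat.digits 10 m).map Nat.digitChar).reverse := by
      have hnneg : ¬ ((m : Int) < 0) := by omega
      simp only [PySem.Int.toChars, if_neg hnneg, Int.toNat_natCast]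
      exact toDigits_eq_rev m hm0
    rw [hcs, List.pairwise_reverse, List.pairwise_map, List.pairwise_cons]
    constructor
    · rintro ⟨-, htail⟩
      rw [List.pairwise_map] at htail
      exact htail.imp_of_mem (fun {a b} ha hb hab =>
        (digitChar_lt_iff a (Nat.digits_lt_base (by norm_num) ha) b
          (Nat.digits_lt_base (by norm_num) hb)).2 (by exact_mod_cast hab))
    · intro h
      refine ⟨?_, ?_⟩
      · intro x hx
        rw [List.mem_map] at hx
        obtain ⟨d, -, rfl⟩ := hx
        omega
      · rw [List.pairwise_map]
        exact h.imp_of_mem (fun {a b} ha hb hab => by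
          exact_mod_cast (digitChar_lt_iff a (Nat.digits_lt_base (by norm_num) ha) b
            (Nat.digits_lt_base (by norm_num) hb)).1 hab)
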